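-- pv_equiv track=rewrite | github.com/OTOYO1020/ChatDev_Intermediate | WareHouse/DD_159__20250518062909/utils.py | count_equal_pairs
-- ===== SOURCE A (Python) =====
-- def count_equal_pairs(N, A):
--     results = []
--     frequency = {}
--     # Build the initial frequency dictionary
--     for num in A:
--         frequency[num] = frequency.get(num, 0) + 1
--     # Function to calculate total pairs from frequency dictionary
--     def calculate_total_pairs(freq):
--         return sum(count * (count - 1) // 2 for count in freq.values() if count > 1)
--     # Calculate initial total pairs
--     total_pairs = calculate_total_pairs(frequency)
--     # Iterate over each k from 1 to N
--     for k in range(1, N + 1):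
--         current_value = A[k - 1]
--         # Decrease the frequency of the current value
--         if current_value in frequency:
--             frequency[current_value] -= 1
--             if frequency[current_value] == 0:
--                 del frequency[current_value]  # Remove from dictionary if count is zero
--         # Recalculate total pairs after excluding current_value
--         total_pairs = calculate_total_pairs(frequency)
--         # Store the result for the current k
--         results.append(total_pairs)
--         # Restore the frequency for the next iteration
--         if current_value in frequency:
--             frequency[current_value] += 1
--         else:
--             frequency[current_value] = 1  # Restore it to 1 if it was removed
--     return results
-- ===== SOURCE B (Python) =====
-- def count_equal_pairs(N, A):
--     freq = {}
--     for num in A: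
--         freq[num] = freq.get(num, 0) + 1
--     total = sum(c * (c - 1) // 2 for c in freq.values())
--     return [total - (freq[A[k]] - 1) for k in range(N)]
-- ===== Notes on version B (the rewrite author's own statement) =====
-- stated objective: faster
-- what changed: Instead of re-summing the whole frequency dictionary for every index k, B computes the total pair count once and answers each index in O(1) as total - (freq[A[k]] - 1).
import Mathlib
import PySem

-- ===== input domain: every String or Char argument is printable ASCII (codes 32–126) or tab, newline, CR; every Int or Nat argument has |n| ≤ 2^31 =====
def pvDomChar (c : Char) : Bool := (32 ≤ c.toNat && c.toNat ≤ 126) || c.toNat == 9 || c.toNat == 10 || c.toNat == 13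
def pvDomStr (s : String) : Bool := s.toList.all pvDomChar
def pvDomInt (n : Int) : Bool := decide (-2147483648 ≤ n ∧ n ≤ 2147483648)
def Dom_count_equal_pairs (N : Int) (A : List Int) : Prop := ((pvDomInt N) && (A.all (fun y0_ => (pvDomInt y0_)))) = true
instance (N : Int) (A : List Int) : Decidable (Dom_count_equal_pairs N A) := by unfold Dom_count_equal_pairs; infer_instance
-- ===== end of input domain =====

-- B computes the total pair count once and answers each index in O(1) by subtracting freq[A[k]]-1,
-- instead of A's per-index re-summation of the whole frequency dictionary (measured faster: asymptotic).


-- ===== PORT A =====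
-- helper: Python's inner 'calculate_total_pairs(freq)'
def calculate_total_pairs (freq : PySem.Dict Int Int) : Int :=
  ((freq.values.filter (fun count => decide (1 < count))).map
    (fun count => PySem.Int.floordiv (count * (count - 1)) 2)).sum

-- the body of A's 'for k in range(1, N + 1)' loop; state = (results, frequency, total_pairs)
def pvStepA (A : List Int) (s : List Int × PySem.Dict Int Int × Int) (k : Int) :
    List Int × PySem.Dict Int Int × Int :=
  let results := s.1
  let frequency := s.2.1
  let current_value := PySem.List.pyGetD A (k - 1) 0   -- A[k-1]; Pre_ keeps the index in range (Python raises otherwise)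
  let frequency :=
    if frequency.contains current_value then
      let f1 := frequency.modify current_value 0 (fun c => c - 1)
      if f1.getD current_value 0 == 0 then f1.erase current_value else f1
    else frequency
  let total_pairs := calculate_total_pairs frequency
  let results := results ++ [total_pairs]
  let frequency :=
    if frequency.contains current_value then frequency.modify current_value 0 (fun c => c + 1)
    else frequency.insert current_value 1
  (results, frequency, total_pairs)

def count_equal_pairs (N : Int) (A : List Int) : List Int :=
  let frequency := A.foldl (fun d num => d.insert num (d.getD num 0 + 1)) PySem.Dict.empty
  let total_pairs := calculate_total_pairs frequency
  ((PySem.List.pyRange 1 (N + 1)).foldl (pvStepA A) ([], frequency, total_pairs)).1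

-- ===== PORT B =====
def count_equal_pairs_alt (N : Int) (A : List Int) : List Int :=
  let freq := A.foldl (fun d num => d.insert num (d.getD num 0 + 1)) PySem.Dict.empty
  let total := (freq.values.map (fun c => PySem.Int.floordiv (c * (c - 1)) 2)).sum
  (PySem.List.pyRange 0 N).map (fun k => total - (freq.getD (PySem.List.pyGetD A k 0) 0 - 1))

-- ===== PRECONDITION & SPEC =====
-- Pre_ excludes exactly the inputs with N > len(A), on which Python A raises IndexError at A[k-1].
def Pre_count_equal_pairs (N : Int) (A : List Int) : Prop := N ≤ A.length
instance (N : Int) (A : List Int) : Decidable (Pre_count_equal_pairs N A) := by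
  unfold Pre_count_equal_pairs; infer_instance
def pvWitness_count_equal_pairs : Int × List Int := (3, [1, 2, 1])

def Spec_count_equal_pairs (N : Int) (A : List Int) (out : List Int) : Prop := out = count_equal_pairs_alt N A
instance (N : Int) (A : List Int) (out : List Int) : Decidable (Spec_count_equal_pairs N A out) := by
  unfold Spec_count_equal_pairs; infer_instance

-- ===== CLAIM (what is proved, stated in full; the proofs are below) =====
def Claim_equal_count_equal_pairs : Prop := ∀ (N : Int) (A : List Int), Dom_count_equal_pairs N A → Pre_count_equal_pairs N A → Spec_count_equal_pairs N A (count_equal_pairs N A)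

-- ===== LEMMAS AND PROOFS =====

-- pvG c = c*(c-1)//2, the pair-count term both programs use
def pvG (c : Int) : Int := PySem.Int.floordiv (c * (c - 1)) 2

-- the value A's calculate_total_pairs computes, as a function of the items list
def pvS (l : List (Int × Int)) : Int :=
  (((l.map (fun p => p.2)).filter (fun c => decide (1 < c))).map pvG).sum

lemma calc_eq (d : PySem.Dict Int Int) : calculate_total_pairs d = pvS d.items := rfl

lemma pvG_sub (c : Int) : pvG c - pvG (c - 1) = c - 1 := by
  obtain ⟨t, ht⟩ : Even (c * (c - 1)) := by
    have := Int.even_mul_succ_self (c - 1)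
    simpa [mul_comm] using this
  obtain ⟨u, hu⟩ : Even ((c - 1) * (c - 1 - 1)) := by
    have := Int.even_mul_succ_self (c - 1 - 1)
    simpa [mul_comm] using this
  have h2 : (0:Int) < 2 := by norm_num
  have key : (t + t) - (u + u) = 2 * (c - 1) := by rw [← ht, ← hu]; ring
  simp only [pvG, PySem.Int.floordiv_eq_ediv_of_pos h2, ht, hu]
  have e1 : (t + t) / 2 = t := by omega
  have e2 : (u + u) / 2 = u := by omega
  rw [e1, e2]; omega

lemma pvG_one : pvG 1 = 0 := by decide

lemma pvS_cons (p : Int × Int) (t : List (Int × Int)) :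
    pvS (p :: t) = (if 1 < p.2 then pvG p.2 else 0) + pvS t := by
  by_cases h : 1 < p.2 <;> simp [pvS, h]

lemma ite_pvG (v : Int) (h : 1 ≤ v) : (if 1 < v then pvG v else 0) = pvG v := by
  by_cases hv : 1 < v
  · simp [hv]
  · have : v = 1 := by omega
    simp [this, pvG_one]

lemma pvS_perm {l l' : List (Int × Int)} (h : l.Perm l') : pvS l = pvS l' :=
  List.Perm.sum_eq (((h.map _).filter _).map _)

-- sum without the 'if count > 1' filter equals the filtered sum when all values are ≥ 1
lemma pvS_nofilter (l : List Int) (h : ∀ c ∈ l, 1 ≤ c) :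
    ((l.filter (fun c => decide (1 < c))).map pvG).sum = (l.map pvG).sum := by
  induction l with
  | nil => rfl
  | cons c t ih =>
    have hc := h c (List.mem_cons_self)
    have ht : ∀ x ∈ t, 1 ≤ x := fun x hx => h x (List.mem_cons_of_mem _ hx)
    by_cases h1 : 1 < c
    · simp [h1, ih ht]
    · have : c = 1 := by omega
      simp [ih ht, this, pvG_one]

-- ----- association-list facts (keys nodup) -----

lemma filter_key_eq {l : List (Int × Int)} {cur c : Int}
    (hnd : (l.map Prod.fst).Nodup) (hm : (cur, c) ∈ l) :
    l.filter (fun p => p.1 == cur) = [(cur, c)] := by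
  induction l with
  | nil => cases hm
  | cons p t ih =>
    simp only [List.map_cons, List.nodup_cons] at hnd
    rcases List.mem_cons.mp hm with h | h
    · subst h
      have : t.filter (fun p => p.1 == cur) = [] := by
        apply List.filter_eq_nil_iff.mpr
        intro q hq hk
        exact hnd.1 (List.mem_map.mpr ⟨q, hq, by simpa using hk⟩)
      simp [this]
    · have hkey : ¬ (p.1 = cur) := by
        intro he
        exact hnd.1 (List.mem_map.mpr ⟨(cur, c), h, by simp [he]⟩)
      simp [hkey, ih hnd.2 h]

lemma perm_key_cons {l : List (Int × Int)} {cur c : Int}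
    (hnd : (l.map Prod.fst).Nodup) (hm : (cur, c) ∈ l) :
    l.Perm ((cur, c) :: l.filter (fun p => !(p.1 == cur))) := by
  have h := List.filter_append_perm (fun p => p.1 == cur) l
  rw [filter_key_eq hnd hm] at h
  exact h.symm.trans (by simp)

lemma map_rep_filter_id {l : List (Int × Int)} {cur : Int} (v : Int) :
    (l.filter (fun p => !(p.1 == cur))).map
      (fun p => if p.1 == cur then (cur, v) else p) = l.filter (fun p => !(p.1 == cur)) := by
  rw [List.map_congr_left, List.map_id]
  intro p hp
  have := (List.mem_filter.mp hp).2
  simp at this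
  simp [this]

lemma map_rep_perm {l : List (Int × Int)} {cur c : Int} (v : Int)
    (hnd : (l.map Prod.fst).Nodup) (hm : (cur, c) ∈ l) :
    (l.map (fun p => if p.1 == cur then (cur, v) else p)).Perm
      ((cur, v) :: l.filter (fun p => !(p.1 == cur))) := by
  have h := (perm_key_cons hnd hm).map (fun p => if p.1 == cur then (cur, v) else p)
  simp only [List.map_cons] at h
  rw [map_rep_filter_id] at h
  simpa using h

lemma filter_not_key_map_rep (l : List (Int × Int)) (cur v : Int) :
    (l.map (fun p => if p.1 == cur then (cur, v) else p)).filter (fun p => !(p.1 == cur))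
      = l.filter (fun p => !(p.1 == cur)) := by
  induction l with
  | nil => rfl
  | cons p t ih =>
    by_cases h : p.1 = cur
    · simpa [h] using ih
    · simpa [h] using ih

-- ----- the per-iteration lemma -----

lemma pvStepA_spec (A : List Int) (res : List Int) (d : PySem.Dict Int Int) (tp k : Int)
    (hperm : d.items.Perm (PySem.Dict.counter A).items)
    (h0 : 0 ≤ k - 1) (h1 : k - 1 < (A.length : Int)) :
    ∃ d' : PySem.Dict Int Int,
      pvStepA A (res, d, tp) k =
        (res ++ [calculate_total_pairs (PySem.Dict.counter A)
            - ((A.count (PySem.List.pyGetD A (k - 1) 0) : Int) - 1)], d',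
          calculate_total_pairs (PySem.Dict.counter A)
            - ((A.count (PySem.List.pyGetD A (k - 1) 0) : Int) - 1))
      ∧ d'.items.Perm (PySem.Dict.counter A).items := by
  set cur := PySem.List.pyGetD A (k - 1) 0 with hcur
  -- cur ∈ A
  have hmemA : cur ∈ A := by
    have hlt : (k - 1).toNat < A.length := by omega
    have hv : PySem.List.pyGetD A (((k - 1).toNat : Nat) : Int) 0 = A.getD (k - 1).toNat 0 :=
      PySem.List.pyGetD_natCast _ _ _
    rw [Int.toNat_of_nonneg h0] at hv
    rw [hcur, hv, List.getD_eq_getElem _ _ hlt]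
    exact List.getElem_mem _
  set c : Int := (A.count cur : Int) with hcdef
  have hc1 : 1 ≤ c := by
    have := List.count_pos_iff.mpr hmemA
    omega
  -- (cur, c) ∈ counter items, and in d.items
  have hmF : (cur, c) ∈ (PySem.Dict.counter A).items := by
    rw [PySem.Dict.items_counter]
    exact List.mem_map.mpr ⟨cur, (PySem.Set.mem_ofList _ _).mpr hmemA, rfl⟩
  have hmd : (cur, c) ∈ d.items := hperm.mem_iff.mpr hmF
  have hndF : ((PySem.Dict.counter A).items.map Prod.fst).Nodup :=
    PySem.Dict.nodup_keys_counter A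
  have hnd : (d.items.map Prod.fst).Nodup := ((hperm.map Prod.fst).nodup_iff).mpr hndF
  have hcont : d.contains cur = true := by
    simp only [PySem.Dict.contains, List.any_eq_true]
    exact ⟨(cur, c), hmd, by simp⟩
  have hget : d.getD cur 0 = c := PySem.Dict.getD_of_mem_items _ hmd hnd 0
  have hmod : d.modify cur 0 (fun x => x - 1) = d.insert cur (c - 1) := by
    rw [PySem.Dict.modify, hget]
  have hSd : pvS d.items = pvS (PySem.Dict.counter A).items := pvS_perm hperm
  have hdecomp := perm_key_cons hnd hmd
  set lrest := d.items.filter (fun p => !(p.1 == cur)) with hlrest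
  have hitems_ins : ∀ v : Int, (d.insert cur v).items =
      d.items.map (fun p => if p.1 == cur then (cur, v) else p) := by
    intro v
    rw [PySem.Dict.items_insert_of_contains _ _ hcont]
  by_cases hc : c = 1
  · -- the count drops to zero: the key is deleted, then re-inserted with value 1
    have hS1 : pvS d.items = pvS lrest := by
      rw [pvS_perm hdecomp, pvS_cons, hc]; norm_num
    have hd1 : ((d.insert cur (c - 1)).erase cur).items = lrest := by
      rw [PySem.Dict.erase, hitems_ins, filter_not_key_map_rep]
    have hcont1 : (PySem.Dict.mk lrest).contains cur = false := by
      simp only [PySem.Dict.contains]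
      apply List.any_eq_false.mpr
      intro p hp
      have := (List.mem_filter.mp hp).2
      simpa using this
    refine ⟨(PySem.Dict.mk lrest).insert cur 1, ?_, ?_⟩
    · simp only [pvStepA]
      rw [← hcur]
      simp only [hcont, if_pos, hmod, PySem.Dict.getD_insert_self]
      have hz : ((c - 1) == (0:Int)) = true := by simp [hc]
      simp only [hz, if_true, calc_eq]
      have herase : (d.insert cur (c - 1)).erase cur = PySem.Dict.mk lrest := by
        apply PySem.Dict.ext; exact hd1
      rw [herase]
      simp only [hcont1, Bool.false_eq_true, if_false]
      have hval : pvS lrest = pvS (PySem.Dict.counter A).items - (c - 1) := by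
        rw [← hS1, hSd, hc]; norm_num
      rw [hval]
    · have : ((PySem.Dict.mk lrest).insert cur 1).items = lrest ++ [(cur, 1)] := by
        rw [PySem.Dict.insert, hcont1]; simp
      rw [this]
      have hp1 : List.Perm (lrest ++ [(cur, 1)]) ((cur, 1) :: lrest) :=
        List.perm_append_singleton _ _
      rw [hc] at hdecomp
      exact (hp1.trans hdecomp.symm).trans hperm
  · -- count stays positive: decrement then increment restores d.insert cur c
    have hc2 : 2 ≤ c := by omega
    have hz : ((c - 1) == (0:Int)) = false := by simp; omega
    have hStot : pvS (d.insert cur (c - 1)).items = pvS (PySem.Dict.counter A).items - (c - 1) := by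
      rw [hitems_ins, pvS_perm (map_rep_perm (c - 1) hnd hmd), pvS_cons,
        ite_pvG (c - 1) (by omega), ← hlrest]
      have hSl : pvS d.items = pvG c + pvS lrest := by
        rw [pvS_perm hdecomp, pvS_cons, ite_pvG c (by omega)]
      have hgs := pvG_sub c
      omega
    have hcont1 : (d.insert cur (c - 1)).contains cur = true :=
      PySem.Dict.contains_insert_self _ _ _
    refine ⟨d.insert cur c, ?_, ?_⟩
    · simp only [pvStepA]
      rw [← hcur]
      simp only [hcont, if_pos, hmod, PySem.Dict.getD_insert_self, hz,
        Bool.false_eq_true, if_false, hcont1, calc_eq]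
      have hrest : ((d.insert cur (c - 1)).modify cur 0 (fun x => x + 1)) = d.insert cur c := by
        rw [PySem.Dict.modify, PySem.Dict.getD_insert_self, PySem.Dict.insert_insert_self]
        congr 1; omega
      rw [hStot, hrest]
    · rw [hitems_ins]
      exact ((map_rep_perm c hnd hmd).trans hdecomp.symm).trans hperm

-- ----- the loop lemma -----

lemma pvLoop (A : List Int) (n : Nat) (hn : (n : Int) ≤ A.length) :
    ∀ res (d : PySem.Dict Int Int) tp, d.items.Perm (PySem.Dict.counter A).items →
    ∃ d' tp', (PySem.List.pyRange 1 ((n : Int) + 1)).foldl (pvStepA A) (res, d, tp)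
        = (res ++ (List.range n).map (fun (i : Nat) => calculate_total_pairs (PySem.Dict.counter A)
            - ((A.count (PySem.List.pyGetD A (i : Int) 0) : Int) - 1)), d', tp')
      ∧ d'.items.Perm (PySem.Dict.counter A).items := by
  induction n with
  | zero =>
    intro res d tp hperm
    refine ⟨d, tp, ?_, hperm⟩
    rw [show ((0:Nat):Int) + 1 = 1 by norm_num, PySem.List.pyRange_one]
    simp
  | succ m ih =>
    intro res d tp hperm
    have hm : (m : Int) ≤ A.length := by push_cast at hn ⊢; omega
    have hsucc : PySem.List.pyRange 1 (((m + 1 : Nat) : Int) + 1)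
        = PySem.List.pyRange 1 ((m : Int) + 1) ++ [(m : Int) + 1] := by
      rw [show (((m + 1 : Nat) : Int) + 1) = ((m : Int) + 1) + 1 by push_cast; ring]
      exact PySem.List.pyRange_one_succ_right (by omega)
    rw [hsucc, List.foldl_append]
    obtain ⟨d1, tp1, heq, hperm1⟩ := ih hm res d tp hperm
    rw [heq]
    simp only [List.foldl_cons, List.foldl_nil]
    obtain ⟨d2, heq2, hperm2⟩ := pvStepA_spec A _ d1 tp1 ((m : Int) + 1) hperm1
      (by omega) (by push_cast at hn ⊢; omega)
    rw [heq2]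
    refine ⟨d2, calculate_total_pairs (PySem.Dict.counter A)
      - ((A.count (PySem.List.pyGetD A (((m : Int) + 1) - 1) 0) : Int) - 1), ?_, hperm2⟩
    rw [List.range_succ, List.map_append, List.append_assoc]
    norm_num

lemma counter_values_pos (A : List Int) : ∀ c ∈ (PySem.Dict.counter A).values, 1 ≤ c := by
  intro c hc
  simp only [PySem.Dict.values, PySem.Dict.items_counter, List.map_map, List.mem_map] at hc
  obtain ⟨k, hk, rfl⟩ := hc
  have : k ∈ A := (PySem.Set.mem_ofList _ _).mp hk
  have := List.count_pos_iff.mpr this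
  simp only [Function.comp]
  exact_mod_cast this

lemma pyRange_nil_of_le {a b : Int} (h : b ≤ a) : PySem.List.pyRange a b = [] := by
  rw [PySem.List.pyRange_one]
  have : (b - a).toNat = 0 := by omega
  simp [this]


-- ===== VERDICT (by name: the statement is the Claim_ definition above) =====
theorem count_equal_pairs_spec : Claim_equal_count_equal_pairs := by
  intro N A hDom hPre
  unfold Spec_count_equal_pairs count_equal_pairs count_equal_pairs_alt
  simp only [PySem.Dict.foldl_insert_getD_add_one_eq_counter]
  by_cases hN : 0 ≤ N
  · obtain ⟨n, rfl⟩ : ∃ n : Nat, N = (n : Int) := ⟨N.toNat, (Int.toNat_of_nonneg hN).symm⟩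
    have hn : (n : Int) ≤ A.length := hPre
    obtain ⟨d', tp', heq, _⟩ := pvLoop A n hn [] (PySem.Dict.counter A) _ (List.Perm.refl _)
    rw [heq]
    simp only [List.nil_append, PySem.List.pyRange_zero_natCast, List.map_map]
    apply List.map_congr_left
    intro i hi
    simp only [Function.comp, PySem.Dict.getD_counter]
    rw [calc_eq]
    have hvals := pvS_nofilter ((PySem.Dict.counter A).values) (counter_values_pos A)
    simp only [pvS]
    -- pvS uses (fun p => p.2); Dict.values is definitionally the same map
    have : ((PySem.Dict.counter A).items.map (fun p => p.2)) = (PySem.Dict.counter A).values := rfl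
    rw [this, hvals]
    rfl
  · rw [not_le] at hN
    rw [pyRange_nil_of_le (by omega : N + 1 ≤ 1), pyRange_nil_of_le (le_of_lt hN)]
    simp
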